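-- pv_equiv track=rewrite | github.com/gongc123/CFT-fixed-point-tensor- | method.py | intpartition
-- ===== SOURCE A (Python) =====
-- def intpartition(n):    #intpartition(3)=['3','21','12','111']
--     s=[]
--     if n==0:
--         return ['']
--     for i in range(1,n+1):
--         k=n-i+1
--         for ele in intpartition(n-k):
--             s.append(str(k)+ele)
--     return s
-- ===== SOURCE B (Python) =====
-- def intpartition(n):
--     # Bottom-up DP: dp[m] holds all compositions of m; each row is built
--     # once from earlier rows instead of recomputing recursive calls.
--     if n < 0:
--         return []
--     dp = [['']]
--     for m in range(1, n + 1):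
--         row = []
--         for j in range(m):
--             row += [str(m - j) + e for e in dp[j]]
--         dp.append(row)
--     return dp[n]
-- ===== Notes on version B (the rewrite author's own statement) =====
-- stated objective: faster
-- what changed: replaces the exponentially-recomputing recursion with a bottom-up dynamic-programming table dp[0..n] of composition lists, each row built once from earlier rows
import Mathlib
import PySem

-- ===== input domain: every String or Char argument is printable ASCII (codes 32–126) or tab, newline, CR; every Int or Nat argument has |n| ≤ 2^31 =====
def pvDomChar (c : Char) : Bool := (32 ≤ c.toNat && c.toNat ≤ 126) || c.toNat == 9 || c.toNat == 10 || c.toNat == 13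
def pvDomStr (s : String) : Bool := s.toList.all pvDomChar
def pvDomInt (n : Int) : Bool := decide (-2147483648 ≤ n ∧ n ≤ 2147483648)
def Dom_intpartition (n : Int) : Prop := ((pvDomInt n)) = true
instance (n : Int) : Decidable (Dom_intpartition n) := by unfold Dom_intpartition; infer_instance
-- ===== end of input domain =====

-- B replaces A's exponentially-recomputing recursion by a bottom-up DP table of
-- composition lists (each row built once from earlier rows); objective: faster.
-- ===== PORT A =====
def intpartition (n : Int) : List String :=
  if n = 0 then [""]
  else
    (PySem.List.pyRange 1 (n + 1) 1).attach.foldl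
      (fun s i =>
        let k := n - i.1 + 1
        (intpartition (n - k)).foldl (fun s ele => s ++ [PySem.Int.toStr k ++ ele]) s)
      []
termination_by n.toNat
decreasing_by
  have h := (PySem.List.mem_pyRange_one).mp i.2
  omega


-- ===== PORT B =====
-- row m of the table: all compositions of m, built from the earlier rows dp[0..m-1]
def pvRow (dp : List (List String)) (m : Nat) : List String :=
  (List.range m).foldl
    (fun row j => row ++ (dp.getD j []).map (fun e => PySem.Int.toStr ((m : Int) - (j : Int)) ++ e))
    []

-- the table dp[0..n] (dp[0] = [""])
def pvDP (n : Nat) : List (List String) :=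
  (List.range n).foldl (fun dp m => dp ++ [pvRow dp (m + 1)]) [[""]]

def intpartition_alt (n : Int) : List String :=
  if n < 0 then [] else (pvDP n.toNat).getD n.toNat []


-- ===== PRECONDITION & SPEC =====
def Spec_intpartition (n : Int) (out : List String) : Prop := out = intpartition_alt n
instance (n : Int) (out : List String) : Decidable (Spec_intpartition n out) := by unfold Spec_intpartition; infer_instance

-- ===== CLAIM (what is proved, stated in full; the proofs are below) =====
def Claim_equal_intpartition : Prop := ∀ (n : Int), Dom_intpartition n → Spec_intpartition n (intpartition n)

-- ===== LEMMAS AND PROOFS =====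

theorem intpartition_neg (n : Int) (h : n < 0) : intpartition n = [] := by
  rw [intpartition, if_neg (by omega), PySem.List.pyRange_one_eq_nil (by omega)]
  rfl

theorem intpartition_zero : intpartition 0 = [""] := by
  rw [intpartition]; rfl

-- one unfolding of A's recursion, reindexed by j = i - 1
theorem intpartition_unfold (n : Int) (h : 0 < n) :
    intpartition n =
      (List.range n.toNat).foldl
        (fun s (j : Nat) => s ++ (intpartition (j : Int)).map (fun e => PySem.Int.toStr (n - (j : Int)) ++ e))
        [] := by
  rw [intpartition, if_neg (by omega)]
  simp only []
  rw [List.foldl_attach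
        (f := fun s (x : Int) =>
          List.foldl (fun s ele => s ++ [PySem.Int.toStr (n - x + 1) ++ ele]) s
            (intpartition (n - (n - x + 1))))]
  rw [PySem.List.pyRange_one]
  have hlen : (n + 1 - 1).toNat = n.toNat := by omega
  rw [hlen, List.foldl_map]
  apply PySem.List.foldl_congr_mem
  intro acc j _
  have h1 : n - (1 + (j : Int)) + 1 = n - (j : Int) := by ring
  have h2 : n - (n - (j : Int)) = (j : Int) := by ring
  rw [h1, h2, PySem.List.foldl_append_singleton_eq_map]

theorem pvDP_eq (n : Nat) :
    pvDP n = (List.range (n + 1)).map (fun (j : Nat) => intpartition (j : Int)) := by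
  induction n with
  | zero =>
    simp [pvDP, List.range_succ, intpartition_zero]
  | succ n ih =>
    have hstep : pvDP (n + 1) = pvDP n ++ [pvRow (pvDP n) (n + 1)] := by
      simp [pvDP, List.range_succ]
    rw [hstep, ih]
    have hrow : pvRow ((List.range (n + 1)).map (fun (j : Nat) => intpartition (j : Int))) (n + 1)
        = intpartition ((n : Int) + 1) := by
      rw [intpartition_unfold ((n : Int) + 1) (by omega)]
      have htn : ((n : Int) + 1).toNat = n + 1 := by omega
      rw [htn, pvRow]
      apply PySem.List.foldl_congr_mem
      intro acc j hj
      rw [List.mem_range] at hj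
      rw [PySem.List.getD_map_range _ _ _ _ hj]
      push_cast
      ring_nf
    rw [hrow]
    rw [List.range_succ (n := n + 1), List.map_append]
    rfl

-- ===== VERDICT (by name: the statement is the Claim_ definition above) =====
theorem intpartition_spec : Claim_equal_intpartition := by
  intro n _
  unfold Spec_intpartition intpartition_alt
  by_cases h : n < 0
  · rw [if_pos h, intpartition_neg n h]
  · rw [if_neg h, pvDP_eq, PySem.List.getD_map_range _ _ _ _ (by omega)]
    rw [Int.toNat_of_nonneg (by omega)]
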